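-- pv_equiv track=rewrite | github.com/wisline97/python-studying | 230303_프로그래머스_레벨1/_07_유형_정렬/_0706_나누어떨어지는숫자배열_정답.py | solution
-- ===== SOURCE A (Python) =====
-- def solution(arr, divisor):
--     answer = []
--     for i in range(len(arr)):
--         if arr[i] % divisor == 0:
--             answer.append(arr[i])
--     answer.sort()
--     if len(answer) == 0:
--         return [-1]
--     return answer
-- ===== SOURCE B (Python) =====
-- def solution(arr, divisor):
--     # online insertion sort: keep answer sorted at all times, no final sort call
--     answer = []
--     for x in arr:
--         if x % divisor == 0:
--             i = 0
--             while i < len(answer) and answer[i] <= x: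
--                 i += 1
--             answer.insert(i, x)
--     return answer if answer else [-1]
-- ===== Notes on version B (the rewrite author's own statement) =====
-- stated objective: alternative
-- what changed: B never calls sort: it maintains the answer as an always-sorted list by insertion-sorting each divisible element into place (scan-and-insert) during a single pass, instead of A's collect-then-sort; the empty case becomes a conditional expression.
import Mathlib
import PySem

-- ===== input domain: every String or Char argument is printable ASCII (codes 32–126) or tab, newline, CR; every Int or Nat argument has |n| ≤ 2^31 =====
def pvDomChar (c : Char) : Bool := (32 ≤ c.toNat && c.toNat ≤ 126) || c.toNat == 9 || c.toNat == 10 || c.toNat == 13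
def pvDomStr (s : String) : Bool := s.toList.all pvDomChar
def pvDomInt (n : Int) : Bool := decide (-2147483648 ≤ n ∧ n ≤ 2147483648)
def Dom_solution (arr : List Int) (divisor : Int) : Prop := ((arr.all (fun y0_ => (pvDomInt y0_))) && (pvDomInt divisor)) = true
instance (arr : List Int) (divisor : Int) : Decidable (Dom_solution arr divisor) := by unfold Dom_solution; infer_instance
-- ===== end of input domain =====

-- B replaces A's collect-then-sort by an online insertion sort (each divisible element is inserted into an always-sorted list); alternative algorithm, same result.


-- ===== PORT A =====
def solution (arr : List Int) (divisor : Int) : List Int :=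
  let answer := (PySem.List.pyRange 0 arr.length 1).foldl
    (fun acc i =>
      if PySem.Int.mod (PySem.List.pyGetD arr i 0) divisor = 0
      then acc ++ [PySem.List.pyGetD arr i 0] else acc) []
  let answer := PySem.List.sorted answer (fun x => x) false
  if answer.length = 0 then [-1] else answer

-- ===== PORT B =====
-- B's inner while-loop scans past the elements ≤ x and inserts x there; ported as this structural recursion.
def pvInsertLE (x : Int) : List Int → List Int
  | [] => [x]
  | y :: ys => if y ≤ x then y :: pvInsertLE x ys else x :: y :: ys

def solution_alt (arr : List Int) (divisor : Int) : List Int :=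
  let answer := arr.foldl
    (fun acc x => if PySem.Int.mod x divisor = 0 then pvInsertLE x acc else acc) []
  if answer.isEmpty then [-1] else answer

-- ===== PRECONDITION & SPEC =====
-- Pre_ excludes only divisor = 0 with a nonempty arr, where Python's '%' raises ZeroDivisionError.
def Pre_solution (arr : List Int) (divisor : Int) : Prop := arr = [] ∨ divisor ≠ 0
instance (arr : List Int) (divisor : Int) : Decidable (Pre_solution arr divisor) := by unfold Pre_solution; infer_instance
def pvWitness_solution : List Int × Int := ([10, 3, 7, 20], 5)
def Spec_solution (arr : List Int) (divisor : Int) (out : List Int) : Prop := out = solution_alt arr divisor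
instance (arr : List Int) (divisor : Int) (out : List Int) : Decidable (Spec_solution arr divisor out) := by unfold Spec_solution; infer_instance

-- ===== CLAIM (what is proved, stated in full; the proofs are below) =====
def Claim_equal_solution : Prop := ∀ (arr : List Int) (divisor : Int), Dom_solution arr divisor → Pre_solution arr divisor → Spec_solution arr divisor (solution arr divisor)

-- ===== LEMMAS AND PROOFS =====

-- A's index loop collects exactly the divisible elements, in order: it is a filter.
theorem pv_loop_eq_filter (arr : List Int) (divisor : Int) :
    (PySem.List.pyRange 0 arr.length 1).foldl
      (fun acc i =>
        if PySem.Int.mod (PySem.List.pyGetD arr i 0) divisor = 0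
        then acc ++ [PySem.List.pyGetD arr i 0] else acc) []
    = arr.filter (fun x => decide (PySem.Int.mod x divisor = 0)) := by
  rw [PySem.List.foldl_pyRange_zero_pyGetD' arr 0
       (fun acc x => if PySem.Int.mod x divisor = 0 then acc ++ [x] else acc) []]
  simpa using PySem.List.foldl_append_if (fun x => decide (PySem.Int.mod x divisor = 0)) id arr []

theorem pvInsertLE_perm (x : Int) (l : List Int) : (pvInsertLE x l).Perm (x :: l) := by
  induction l with
  | nil => simp [pvInsertLE]
  | cons y ys ih =>
    simp only [pvInsertLE]
    split
    · exact ((ih.cons y).trans (List.Perm.swap x y ys))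
    · exact List.Perm.refl _

theorem pvInsertLE_pairwise (x : Int) (l : List Int)
    (h : l.Pairwise (· ≤ ·)) : (pvInsertLE x l).Pairwise (· ≤ ·) := by
  induction l with
  | nil => simp [pvInsertLE]
  | cons y ys ih =>
    rcases List.pairwise_cons.mp h with ⟨hy, hys⟩
    simp only [pvInsertLE]
    split
    · rename_i hyx
      refine List.pairwise_cons.mpr ⟨?_, ih hys⟩
      intro z hz
      have := (pvInsertLE_perm x ys).mem_iff.mp hz
      rcases List.mem_cons.mp this with rfl | hz'
      · exact hyx
      · exact hy z hz'
    · rename_i hyx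
      have hxy : x ≤ y := le_of_lt (lt_of_not_ge hyx)
      refine List.pairwise_cons.mpr ⟨?_, h⟩
      intro z hz
      rcases List.mem_cons.mp hz with rfl | hz'
      · exact hxy
      · exact le_trans hxy (hy z hz')

-- B's fold inserts each filtered element into an always-sorted accumulator:
-- the result is a permutation of acc ++ filter, and stays pairwise-sorted.
theorem pv_fold_sorts (divisor : Int) (arr : List Int) :
    ∀ acc : List Int, acc.Pairwise (· ≤ ·) →
      (arr.foldl (fun acc x => if PySem.Int.mod x divisor = 0 then pvInsertLE x acc else acc) acc).Perm
        (acc ++ arr.filter (fun x => decide (PySem.Int.mod x divisor = 0))) ∧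
      (arr.foldl (fun acc x => if PySem.Int.mod x divisor = 0 then pvInsertLE x acc else acc) acc).Pairwise (· ≤ ·) := by
  induction arr with
  | nil => intro acc h; exact ⟨by simp, h⟩
  | cons x xs ih =>
    intro acc h
    simp only [List.foldl_cons, List.filter_cons]
    by_cases hx : PySem.Int.mod x divisor = 0
    · simp only [hx, if_true, decide_true]
      obtain ⟨hp, hs⟩ := ih (pvInsertLE x acc) (pvInsertLE_pairwise x acc h)
      refine ⟨hp.trans ?_, hs⟩
      exact (((pvInsertLE_perm x acc).append_right _).trans List.perm_middle.symm)
    · rw [if_neg hx, if_neg (by simpa using hx)]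
      exact ih acc h

-- ===== VERDICT (by name: the statement is the Claim_ definition above) =====
theorem solution_spec : Claim_equal_solution := by
  intro arr divisor _ _
  obtain ⟨hp, hs⟩ := pv_fold_sorts divisor arr [] List.Pairwise.nil
  have key := PySem.List.sorted_id_eq_of_perm_of_pairwise _ _ (by simpa using hp) hs
  unfold Spec_solution solution solution_alt
  simp only [pv_loop_eq_filter, key]
  rcases h : arr.foldl (fun acc x => if PySem.Int.mod x divisor = 0 then pvInsertLE x acc else acc) [] with _ | ⟨y, ys⟩ <;> simp
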